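-- pv_equiv track=rewrite | github.com/waegaein/boj | 6064/run.py | get_ys_possible
-- ===== SOURCE A (Python) =====
-- from math import gcd
--
-- def get_ys_possible(M, N, x, y_first):
--     ys_possible = list()
--     max_order = abs(M * N) // gcd(M, N)
--     current_order = x
--     current_y = y_first
--
--     while current_order <= max_order:
--         ys_possible.append(current_y)
--
--         current_order += M
--         current_y = get_y_next(M, N, current_y)
--
--     return ys_possible
--
-- def get_y_next(M, N, current_y):
--     y_candidate = current_y + M
--
--     if y_candidate <= N:
--         return y_candidate
--
--     if y_candidate % N == 0:
--         return N
--     else: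
--         return y_candidate % N
-- ===== SOURCE B (Python) =====
-- from math import gcd
--
-- def get_ys_possible(M, N, x, y_first):
--     max_order = abs(M * N) // gcd(M, N)
--     if x > max_order:
--         return []
--     count = (max_order - x) // M + 1
--     # number of leading positions still on the raw (un-wrapped) y values;
--     # position 0 is always the raw y_first
--     raw = (N - y_first) // M + 1 if y_first <= N else 1
--     lin = min(raw, count)
--     return [y_first + k * M for k in range(lin)] + \
--            [(y_first - 1 + k * M) % N + 1 for k in range(lin, count)]
-- ===== Notes on version B (the rewrite author's own statement) =====
-- stated objective: alternative
-- what changed: Replaces the step-by-step while-loop with its get_y_next recurrence and list accumulator by a closed-form construction: the iteration count and the length of the raw (un-wrapped) prefix are computed by floor division, and the list is built by two comprehensions (raw linear values, then the modular closed form ((y_first-1+k*M)%N)+1).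
-- outside the precondition, e.g. on get_ys_possible(2, -3, 1, 1): A returns [1, -3, -1], B returns [1, 0, -1]
import Mathlib
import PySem

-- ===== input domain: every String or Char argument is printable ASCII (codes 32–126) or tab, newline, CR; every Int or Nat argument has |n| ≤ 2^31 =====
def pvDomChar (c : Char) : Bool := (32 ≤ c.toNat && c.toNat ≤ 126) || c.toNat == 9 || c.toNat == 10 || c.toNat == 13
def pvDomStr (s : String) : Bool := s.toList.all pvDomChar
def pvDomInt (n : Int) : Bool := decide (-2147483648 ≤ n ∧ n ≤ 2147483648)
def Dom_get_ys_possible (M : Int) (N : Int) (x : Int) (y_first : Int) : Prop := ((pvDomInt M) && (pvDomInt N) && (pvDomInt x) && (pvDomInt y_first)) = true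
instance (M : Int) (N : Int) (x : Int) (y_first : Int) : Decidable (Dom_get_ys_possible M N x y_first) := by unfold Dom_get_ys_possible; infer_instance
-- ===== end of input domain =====

-- B replaces A's step-by-step recurrence loop with a closed-form two-comprehension construction (objective: alternative).

-- ===== PORT A =====
def get_y_next (M : Int) (N : Int) (current_y : Int) : Int :=
  let y_candidate := current_y + M
  if y_candidate ≤ N then y_candidate
  else if PySem.Int.mod y_candidate N = 0 then N
  else PySem.Int.mod y_candidate N

-- A's while loop; the `1 ≤ M` conjunct is only a totality guard (Python diverges when M ≤ 0 and the loop is entered)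
def pyGysLoop (M : Int) (N : Int) (max_order : Int) (current_order : Int) (current_y : Int) (acc : List Int) : List Int :=
  if h : current_order ≤ max_order ∧ 1 ≤ M then
    pyGysLoop M N max_order (current_order + M) (get_y_next M N current_y) (acc ++ [current_y])
  else acc
termination_by (max_order + 1 - current_order).toNat
decreasing_by omega

def get_ys_possible (M : Int) (N : Int) (x : Int) (y_first : Int) : List Int :=
  let max_order := PySem.Int.floordiv |M * N| ((Int.gcd M N : Nat) : Int)
  pyGysLoop M N max_order x y_first []

-- ===== PORT B =====
def get_ys_possible_alt (M : Int) (N : Int) (x : Int) (y_first : Int) : List Int :=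
  let max_order := PySem.Int.floordiv |M * N| ((Int.gcd M N : Nat) : Int)
  if x > max_order then []
  else
    let count := PySem.Int.floordiv (max_order - x) M + 1
    let raw := if y_first ≤ N then PySem.Int.floordiv (N - y_first) M + 1 else 1
    let lin := min raw count
    (PySem.List.pyRange 0 lin 1).map (fun k => y_first + k * M) ++
    (PySem.List.pyRange lin count 1).map (fun k => PySem.Int.mod (y_first - 1 + k * M) N + 1)

-- ===== PRECONDITION & SPEC =====
-- Pre_ is the problem's natural calendar domain M ≥ 1, N ≥ 1, plus the trivially-empty case x > max_order
-- (where A returns [] for any M, N); excluded otherwise are M ≤ 0, where the Python loop diverges whenever it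
-- is entered (or gcd(0,0) divides by zero), and N ≤ 0, which raises ZeroDivisionError or exercises Python's
-- negative-divisor modulo outside the problem's domain.
def Pre_get_ys_possible (M : Int) (N : Int) (x : Int) (y_first : Int) : Prop :=
  (1 ≤ M ∧ 1 ≤ N) ∨ (¬ (M = 0 ∧ N = 0) ∧ PySem.Int.floordiv |M * N| ((Int.gcd M N : Nat) : Int) < x)
instance (M : Int) (N : Int) (x : Int) (y_first : Int) : Decidable (Pre_get_ys_possible M N x y_first) := by unfold Pre_get_ys_possible; infer_instance

def pvWitness_get_ys_possible : Int × Int × Int × Int := (4, 7, 2, 3)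

def Spec_get_ys_possible (M : Int) (N : Int) (x : Int) (y_first : Int) (out : List Int) : Prop := out = get_ys_possible_alt M N x y_first
instance (M : Int) (N : Int) (x : Int) (y_first : Int) (out : List Int) : Decidable (Spec_get_ys_possible M N x y_first out) := by unfold Spec_get_ys_possible; infer_instance

-- ===== CLAIM (what is proved, stated in full; the proofs are below) =====
def Claim_equal_get_ys_possible : Prop := ∀ (M : Int) (N : Int) (x : Int) (y_first : Int), Dom_get_ys_possible M N x y_first → Pre_get_ys_possible M N x y_first → Spec_get_ys_possible M N x y_first (get_ys_possible M N x y_first)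

-- ===== LEMMAS AND PROOFS =====

-- proof-side single indexing function: element k of B's list (lin = length of the raw prefix)
def altF (M : Int) (N : Int) (lin : Int) (y : Int) (k : Int) : Int :=
  if k < lin then y + k * M else (y - 1 + k * M) % N + 1

-- proof-side core of B, with max_order abstracted and PySem arithmetic turned into ediv/emod
def altCore (M : Int) (N : Int) (mo : Int) (x : Int) (y : Int) : List Int :=
  if mo < x then []
  else (PySem.List.pyRange 0 ((mo - x) / M + 1) 1).map
    (altF M N (min (if y ≤ N then (N - y) / M + 1 else 1) ((mo - x) / M + 1)) y)

-- B's port equals the proof-side core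
lemma alt_eq_core (M N x y : Int) (hM : 0 < M) (hN : 0 < N) :
    get_ys_possible_alt M N x y =
      altCore M N (PySem.Int.floordiv |M * N| ((Int.gcd M N : Nat) : Int)) x y := by
  unfold get_ys_possible_alt altCore
  simp only [PySem.Int.floordiv_eq_ediv_of_pos hM, PySem.Int.mod_eq_emod_of_pos hN]
  set mo := PySem.Int.floordiv |M * N| ((Int.gcd M N : Nat) : Int) with hmo
  by_cases hx : mo < x
  · simp [hx]
  · rw [if_neg (by simpa using hx), if_neg hx]
    set cnt := (mo - x) / M + 1 with hcnt
    have hcnt1 : 1 ≤ cnt := by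
      have : 0 ≤ (mo - x) / M := Int.ediv_nonneg (by omega) (by omega)
      omega
    set raw := if y ≤ N then (N - y) / M + 1 else 1 with hraw
    have hraw1 : 1 ≤ raw := by
      rw [hraw]; split
      · have : 0 ≤ (N - y) / M := Int.ediv_nonneg (by omega) (by omega)
        omega
      · omega
    set lin := min raw cnt with hlin
    have hlin1 : 1 ≤ lin := by omega
    rw [PySem.List.pyRange_one_append 0 lin cnt (by omega) (by omega), List.map_append]
    congr 1
    · apply List.map_congr_left
      intro k hk
      rw [PySem.List.mem_pyRange_one] at hk
      simp [altF, hk.2]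
    · apply List.map_congr_left
      intro k hk
      rw [PySem.List.mem_pyRange_one] at hk
      have : ¬ k < lin := by omega
      simp [altF, this]

-- Python's `N if c % N == 0 else c % N` is the closed form (c-1) % N + 1, for any c and 0 < N
lemma wrap_mod (N : Int) (hN : 0 < N) (c : Int) :
    (if c % N = 0 then N else c % N) = (c - 1) % N + 1 := by
  have h1 : (c - 1) % N = (c % N - 1 + N * (c / N)) % N := by
    congr 1
    have := Int.ediv_add_emod c N
    omega
  rw [Int.add_mul_emod_self_left] at h1
  have hr0 : 0 ≤ c % N := Int.emod_nonneg c (by omega)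
  have hr1 : c % N < N := Int.emod_lt_of_pos c hN
  by_cases h : c % N = 0
  · rw [if_pos h]
    rw [h] at h1
    have h2 : (0 - 1 + N * 1) % N = (0 - 1 : Int) % N := Int.add_mul_emod_self_left (0 - 1) N 1
    have h3 : ((N : Int) - 1) % N = N - 1 := Int.emod_eq_of_lt (by omega) (by omega)
    have : (0 - 1 + N * 1 : Int) = N - 1 := by ring
    rw [this] at h2
    omega
  · rw [if_neg h]
    have h3 : (c % N - 1) % N = c % N - 1 := Int.emod_eq_of_lt (by omega) (by omega)
    omega

-- get_y_next in closed form
lemma get_y_next_eq (M N y : Int) (hM : 0 < M) (hN : 0 < N) :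
    get_y_next M N y = if y + M ≤ N then y + M else (y + M - 1) % N + 1 := by
  unfold get_y_next
  simp only [PySem.Int.mod_eq_emod_of_pos hN]
  by_cases h : y + M ≤ N
  · simp [h]
  · simp only [h, if_neg, if_false]
    rw [← wrap_mod N hN (y + M)]

-- shift a map over pyRange 0 c 1 by one
lemma map_pyRange_shift (f : Int → Int) (c : Int) (hc : 1 ≤ c) :
    (PySem.List.pyRange 0 c 1).map f
      = f 0 :: (PySem.List.pyRange 0 (c - 1) 1).map (fun k => f (k + 1)) := by
  rw [PySem.List.pyRange_one_cons (by omega : (0:Int) < c)]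
  simp only [List.map_cons]
  congr 1
  rw [PySem.List.pyRange_one, PySem.List.pyRange_one]
  have : (c - 1 - 0).toNat = (c - (0+1)).toNat := by omega
  rw [this, List.map_map, List.map_map]
  apply List.map_congr_left
  intro k _
  simp only [Function.comp_apply]
  congr 1
  omega

-- congruence of the modular closed form along one step: (y-1+(k+1)M) ≡ (y'-1+kM) (mod N) when y'-1 = (y+M-1) % N
lemma mod_step_congr (N y M k : Int) (hN : 0 < N) :
    (y - 1 + (k + 1) * M) % N = ((y + M - 1) % N + k * M) % N := by
  have h1 : y - 1 + (k + 1) * M = (y + M - 1) + k * M := by ring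
  rw [h1]
  conv_lhs => rw [Int.add_emod]
  conv_rhs => rw [Int.add_emod]
  rw [Int.emod_emod_of_dvd _ (dvd_refl N)]

-- the heart: one unfolding of B's closed form matches one iteration of A's recurrence
lemma altCore_cons (M N mo x y : Int) (hM : 0 < M) (hN : 0 < N) (hx : x ≤ mo) :
    altCore M N mo x y = y :: altCore M N mo (x + M) (get_y_next M N y) := by
  have hq0 : 0 ≤ (mo - x) / M := Int.ediv_nonneg (by omega) (by omega)
  set cnt := (mo - x) / M + 1 with hcnt
  have hcnt1 : 1 ≤ cnt := by omega
  set raw := (if y ≤ N then (N - y) / M + 1 else 1) with hraw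
  have hraw1 : 1 ≤ raw := by
    rw [hraw]; split
    · have : 0 ≤ (N - y) / M := Int.ediv_nonneg (by omega) (by omega)
      omega
    · omega
  set y' := get_y_next M N y with hy'
  rw [show altCore M N mo x y
      = (PySem.List.pyRange 0 cnt 1).map (altF M N (min raw cnt) y) from by
    unfold altCore; rw [if_neg (by omega)]]
  rw [map_pyRange_shift _ cnt hcnt1]
  have hF0 : altF M N (min raw cnt) y 0 = y := by
    simp [altF, show (0:Int) < min raw cnt by omega]
  rw [hF0]
  congr 1
  by_cases hend : mo < x + M
  · -- last iteration: cnt = 1, both tails empty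
    have hq : (mo - x) / M = 0 := Int.ediv_eq_zero_of_lt (by omega) (by omega)
    have : cnt - 1 = 0 := by omega
    rw [this, PySem.List.pyRange_one_eq_nil (by omega)]
    unfold altCore
    rw [if_pos hend]
    simp
  · -- cnt' = cnt - 1
    have hcnt' : (mo - (x + M)) / M + 1 = cnt - 1 := by
      have : mo - (x + M) = (mo - x) + (-1) * M := by ring
      rw [this, Int.add_mul_ediv_right _ _ (by omega : M ≠ 0)]
      omega
    have hcnt2 : 2 ≤ cnt := by
      have : 0 ≤ (mo - (x + M)) / M := Int.ediv_nonneg (by omega) (by omega)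
      omega
    rw [show altCore M N mo (x + M) y'
        = (PySem.List.pyRange 0 (cnt - 1) 1).map
            (altF M N (min (if y' ≤ N then (N - y') / M + 1 else 1) (cnt - 1)) y') from by
      unfold altCore; rw [if_neg (by omega), hcnt']]
    apply List.map_congr_left
    intro k hk
    rw [PySem.List.mem_pyRange_one] at hk
    obtain ⟨hk0, hk1⟩ := hk
    by_cases hlin : y + M ≤ N
    · -- still in the raw linear zone: y' = y + M, raw shrinks by one
      have hyN : y ≤ N := by omega
      have hy'eq : y' = y + M := by
        rw [hy', get_y_next_eq M N y hM hN, if_pos hlin]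
      have hrawy : raw = (N - y) / M + 1 := by rw [hraw, if_pos hyN]
      have hraw' : (if y' ≤ N then (N - y') / M + 1 else 1) = raw - 1 := by
        rw [if_pos (by omega), hy'eq, hrawy]
        have : N - (y + M) = (N - y) + (-1) * M := by ring
        rw [this, Int.add_mul_ediv_right _ _ (by omega : M ≠ 0)]
        ring
      have hraw2 : 2 ≤ raw := by
        have h1 : 1 ≤ (N - y) / M :=
          (Int.le_ediv_iff_mul_le hM).2 (by omega)
        omega
      rw [hraw']
      have hmin : min (raw - 1) (cnt - 1) = min raw cnt - 1 := by omega
      rw [hmin]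
      by_cases hkl : k < min raw cnt - 1
      · simp only [altF, if_pos hkl, if_pos (show k + 1 < min raw cnt by omega)]
        rw [hy'eq]; ring
      · simp only [altF, if_neg hkl, if_neg (show ¬ k + 1 < min raw cnt by omega)]
        rw [hy'eq]
        congr 2
        ring
    · -- wrap step: y' = (y+M-1) % N + 1 ∈ [1, N]
      have hy'eq : y' = (y + M - 1) % N + 1 := by
        rw [hy', get_y_next_eq M N y hM hN, if_neg hlin]
      have hy'lb : 1 ≤ y' := by
        have := Int.emod_nonneg (y + M - 1) (by omega : N ≠ 0)
        omega
      have hy'ub : y' ≤ N := by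
        have := Int.emod_lt_of_pos (y + M - 1) hN
        omega
      have hrawy : raw = 1 := by
        rw [hraw]
        by_cases hyN : y ≤ N
        · rw [if_pos hyN]
          have : (N - y) / M = 0 := Int.ediv_eq_zero_of_lt (by omega) (by omega)
          omega
        · rw [if_neg hyN]
      have hmin1 : min raw cnt = 1 := by omega
      have hLHS : altF M N (min raw cnt) y (k + 1) = (y' - 1 + k * M) % N + 1 := by
        rw [hmin1]
        simp only [altF, if_neg (show ¬ k + 1 < (1:Int) by omega)]
        rw [mod_step_congr N y M k hN]
        congr 2
        omega
      rw [hLHS, if_pos hy'ub]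
      set raw' := (N - y') / M + 1 with hraw'
      by_cases hkl : k < min raw' (cnt - 1)
      · -- RHS linear; closed form reduces since 1 ≤ y' + kM ≤ N
        have hkraw : k ≤ (N - y') / M := by omega
        have hkM : k * M ≤ N - y' := (Int.le_ediv_iff_mul_le hM).1 hkraw
        have hrange : (y' - 1 + k * M) % N = y' - 1 + k * M :=
          Int.emod_eq_of_lt (by nlinarith) (by omega)
        simp only [altF, if_pos hkl, hrange]
        omega
      · simp only [altF, if_neg hkl]

-- A's loop equals B's core
lemma loop_eq_core (M N mo : Int) (hM : 0 < M) (hN : 0 < N) (x y : Int) (acc : List Int) :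
    pyGysLoop M N mo x y acc = acc ++ altCore M N mo x y := by
  rw [pyGysLoop]
  by_cases hx : x ≤ mo
  · rw [dif_pos ⟨hx, by omega⟩,
      loop_eq_core M N mo hM hN (x + M) (get_y_next M N y) (acc ++ [y]),
      altCore_cons M N mo x y hM hN hx]
    simp
  · rw [dif_neg (by omega)]
    unfold altCore
    rw [if_pos (by omega)]
    simp
termination_by (mo + 1 - x).toNat
decreasing_by omega

-- ===== VERDICT (by name: the statement is the Claim_ definition above) =====
theorem get_ys_possible_spec : Claim_equal_get_ys_possible := by
  unfold Claim_equal_get_ys_possible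
  intro M N x y _ hpre
  unfold Spec_get_ys_possible get_ys_possible
  rcases hpre with ⟨hM, hN⟩ | ⟨_, hx⟩
  · rw [alt_eq_core M N x y (by omega) (by omega)]
    exact loop_eq_core M N _ (by omega) (by omega) x y []
  · rw [pyGysLoop, dif_neg (by omega)]
    unfold get_ys_possible_alt
    rw [if_pos (by omega)]
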